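-- pv_equiv track=rewrite | github.com/AnarBattsengel0420/RAG | app.py | should_skip_directory
-- ===== SOURCE A (Python) =====
-- def should_skip_directory(dirpath):
--     skip_dirs = {
--         'node_modules', '__pycache__', '.git', '.venv', 'venv',
--         'AppData', 'Windows', 'Program Files', 'System32',
--         '$RECYCLE.BIN', 'Recovery', 'ProgramData',
--         'Microsoft VS Code', 'Visual Studio', 'extensions',
--         'resources', 'locales', 'vendor', 'build', 'dist',
--     }
--     lower = dirpath.lower()
--     return any(s.lower() in lower for s in skip_dirs)
-- ===== SOURCE B (Python) =====
-- # Sliding-window scan: walk the lowered path once, testing each position for a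
-- # skip-token prefix, instead of running a separate substring search per token.
-- _SKIP_TOKENS = (
--     'node_modules', '__pycache__', '.git', '.venv', 'venv',
--     'appdata', 'windows', 'program files', 'system32',
--     '$recycle.bin', 'recovery', 'programdata',
--     'microsoft vs code', 'visual studio', 'extensions',
--     'resources', 'locales', 'vendor', 'build', 'dist',
-- )
--
-- def should_skip_directory(dirpath):
--     rest = dirpath.lower()
--     while rest:
--         for t in _SKIP_TOKENS:
--             if rest.startswith(t):
--                 return True
--         rest = rest[1:]
--     return False
-- ===== Notes on version B (the rewrite author's own statement) =====
-- stated objective: alternative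
-- what changed: B pre-lowers the skip tokens once and replaces A's per-token substring searches (any over the set, each scanning the whole path) by a single left-to-right sliding scan of the lowered path that tests each position for a skip-token prefix.
import Mathlib
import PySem

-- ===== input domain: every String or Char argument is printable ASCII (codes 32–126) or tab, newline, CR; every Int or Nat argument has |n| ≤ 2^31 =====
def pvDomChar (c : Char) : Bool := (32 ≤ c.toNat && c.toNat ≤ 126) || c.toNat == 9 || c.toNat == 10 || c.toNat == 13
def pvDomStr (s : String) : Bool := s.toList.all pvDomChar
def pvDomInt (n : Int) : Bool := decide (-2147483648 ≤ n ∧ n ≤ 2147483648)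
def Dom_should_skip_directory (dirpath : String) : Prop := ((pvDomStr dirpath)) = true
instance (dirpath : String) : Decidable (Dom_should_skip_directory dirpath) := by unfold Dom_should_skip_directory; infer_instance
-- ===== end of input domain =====

-- B replaces the per-token substring searches by a single left-to-right scan that
-- tests each position for a skip-token prefix (alternative decomposition; same cost class).


-- ===== PORT A =====
def should_skip_directory (dirpath : String) : Bool :=
  let skip_dirs : PySem.Set String := PySem.Set.ofList
    ["node_modules", "__pycache__", ".git", ".venv", "venv",
     "AppData", "Windows", "Program Files", "System32",
     "$RECYCLE.BIN", "Recovery", "ProgramData",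
     "Microsoft VS Code", "Visual Studio", "extensions",
     "resources", "locales", "vendor", "build", "dist"]
  let lower := PySem.Str.lower dirpath
  skip_dirs.any (fun s => PySem.Str.isIn (PySem.Str.lower s) lower)

-- ===== PORT B =====
def pvSkipTokens : List String :=
  ["node_modules", "__pycache__", ".git", ".venv", "venv",
   "appdata", "windows", "program files", "system32",
   "$recycle.bin", "recovery", "programdata",
   "microsoft vs code", "visual studio", "extensions",
   "resources", "locales", "vendor", "build", "dist"]

-- the 'while rest: … rest = rest[1:]' loop of Source B, on the character list
def pvScan : List Char → Bool
  | [] => false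
  | c :: rest =>
      pvSkipTokens.any (fun t => PySem.Chars.startswith (c :: rest) t.toList) || pvScan rest

def should_skip_directory_alt (dirpath : String) : Bool :=
  pvScan (PySem.Str.lower dirpath).toList

-- ===== PRECONDITION & SPEC =====
def Spec_should_skip_directory (dirpath : String) (out : Bool) : Prop := out = should_skip_directory_alt dirpath
instance (dirpath : String) (out : Bool) : Decidable (Spec_should_skip_directory dirpath out) := by unfold Spec_should_skip_directory; infer_instance

-- ===== CLAIM (what is proved, stated in full; the proofs are below) =====
def Claim_equal_should_skip_directory : Prop := ∀ (dirpath : String), Dom_should_skip_directory dirpath → Spec_should_skip_directory dirpath (should_skip_directory dirpath)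

-- ===== LEMMAS AND PROOFS =====

lemma isIn_cons (t : List Char) (c : Char) (rest : List Char) :
    PySem.Chars.isIn t (c :: rest)
      = (PySem.Chars.startswith (c :: rest) t || PySem.Chars.isIn t rest) := by
  rw [Bool.eq_iff_iff]
  simp [PySem.Chars.isIn_iff_infix, PySem.Chars.startswith_iff, List.infix_cons_iff]

lemma scan_eq (l : List Char) :
    pvScan l = pvSkipTokens.any (fun t => PySem.Chars.isIn t.toList l) := by
  induction l with
  | nil => decide
  | cons c rest ih =>
      rw [pvScan, ih, Bool.eq_iff_iff]
      simp only [isIn_cons, Bool.or_eq_true, List.any_eq_true]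
      constructor
      · rintro (⟨t, ht, h⟩ | ⟨t, ht, h⟩)
        exacts [⟨t, ht, Or.inl h⟩, ⟨t, ht, Or.inr h⟩]
      · rintro ⟨t, ht, h | h⟩
        exacts [Or.inl ⟨t, ht, h⟩, Or.inr ⟨t, ht, h⟩]

lemma tokens_map_lower :
    (PySem.Set.ofList
      ["node_modules", "__pycache__", ".git", ".venv", "venv",
       "AppData", "Windows", "Program Files", "System32",
       "$RECYCLE.BIN", "Recovery", "ProgramData",
       "Microsoft VS Code", "Visual Studio", "extensions",
       "resources", "locales", "vendor", "build", "dist"] : List String).map PySem.Str.lower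
      = pvSkipTokens := by decide

-- ===== VERDICT (by name: the statement is the Claim_ definition above) =====
theorem should_skip_directory_spec : Claim_equal_should_skip_directory := by
  intro dirpath _
  unfold Spec_should_skip_directory should_skip_directory should_skip_directory_alt
  rw [scan_eq, ← tokens_map_lower, List.any_map]
  simp [Function.comp_def, PySem.Str.toList_lower]
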